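-- pv_equiv track=rewrite | github.com/akhanal07/Training | DAY3/largest.py | largest_contiguous_subarray
-- ===== SOURCE A (Python) =====
-- def largest_contiguous_subarray(arr):
--     n = len(arr)
--     max_len = 0
--
--     for i in range(n):
--
--         element_set = set()
--
--
--         min_val = arr[i]
--         max_val = arr[i]
--
--
--         for j in range(i, n):
--
--             if arr[j] in element_set:
--                 break
--
--             # Add the current element to the set
--             element_set.add(arr[j])
--
--             # Update the minimum and maximum element
--             min_val = min(min_val, arr[j])
--             max_val = max(max_val, arr[j])
--
--             # Check if the current subarray forms a contiguous subarray
--             if max_val - min_val == j - i: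
--                 max_len = max(max_len, j - i + 1)
--
--     return max_len
-- ===== SOURCE B (Python) =====
-- def largest_contiguous_subarray(arr):
--     n = len(arr)
--     max_len = 0
--     for i in range(n):
--         for j in range(i, n):
--             w = sorted(arr[i:j + 1])
--             if all(w[k + 1] - w[k] == 1 for k in range(len(w) - 1)):
--                 max_len = max(max_len, j - i + 1)
--     return max_len
-- ===== Notes on version B (the rewrite author's own statement) =====
-- stated objective: simpler
-- what changed: Replaces the incremental set/min/max bookkeeping with early break by a stateless sort-and-scan: each window arr[i:j+1] is sorted and declared valid iff all adjacent differences are exactly 1.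
import Mathlib
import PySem

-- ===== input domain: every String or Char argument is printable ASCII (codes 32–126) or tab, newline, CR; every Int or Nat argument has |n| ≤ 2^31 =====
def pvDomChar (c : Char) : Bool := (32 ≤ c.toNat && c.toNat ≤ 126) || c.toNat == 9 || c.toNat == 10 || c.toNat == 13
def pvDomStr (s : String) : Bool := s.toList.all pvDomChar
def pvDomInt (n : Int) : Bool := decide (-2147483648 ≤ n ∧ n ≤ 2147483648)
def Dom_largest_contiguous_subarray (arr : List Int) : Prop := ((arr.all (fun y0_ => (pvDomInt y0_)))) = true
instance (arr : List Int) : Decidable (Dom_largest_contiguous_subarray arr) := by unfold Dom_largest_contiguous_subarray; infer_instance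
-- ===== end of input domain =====

-- B replaces A's incremental set/min/max bookkeeping (with early break) by a stateless
-- sort-and-scan validity test on each window; same return value, simpler code, not faster.

-- ===== PORT A =====
-- inner 'for j in range(i, n)' loop of A; returning max_len at 'if arr[j] in element_set' is the 'break'
def pvInnerA (arr : List Int) (i : Int) : List Int → PySem.Set Int → Int → Int → Int → Int
  | [], _, _, _, max_len => max_len
  | j :: js, s, mn, mx, max_len =>
    let x := PySem.List.pyGetD arr j 0   -- arr[j]; j ∈ range(len(arr)), always in range
    if PySem.Set.contains s x then max_len
    else
      let s' := PySem.Set.add s x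
      let mn' := min mn x
      let mx' := max mx x
      let max_len' := if mx' - mn' = j - i then max max_len (j - i + 1) else max_len
      pvInnerA arr i js s' mn' mx' max_len'

def largest_contiguous_subarray (arr : List Int) : Int :=
  let n : Int := (arr.length : Int)
  (PySem.List.pyRange 0 n 1).foldl
    (fun max_len i =>
      let a0 := PySem.List.pyGetD arr i 0   -- arr[i]; i ∈ range(n), always in range
      pvInnerA arr i (PySem.List.pyRange i n 1) PySem.Set.empty a0 a0 max_len)
    0

-- ===== PORT B =====
-- 'all(w[k+1] - w[k] == 1 for k in range(len(w)-1))': every adjacent difference is 1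
def pvAdjOnes : List Int → Bool
  | a :: b :: t => (b - a == 1) && pvAdjOnes (b :: t)
  | _ => true

def largest_contiguous_subarray_alt (arr : List Int) : Int :=
  let n : Int := (arr.length : Int)
  (PySem.List.pyRange 0 n 1).foldl
    (fun max_len i =>
      (PySem.List.pyRange i n 1).foldl
        (fun acc j =>
          let w := PySem.List.sorted (PySem.List.slice arr (some i) (some (j + 1))) (fun x => x)
          if pvAdjOnes w then max acc (j - i + 1) else acc)
        max_len)
    0

-- ===== PRECONDITION & SPEC =====
def Spec_largest_contiguous_subarray (arr : List Int) (out : Int) : Prop := out = largest_contiguous_subarray_alt arr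
instance (arr : List Int) (out : Int) : Decidable (Spec_largest_contiguous_subarray arr out) := by unfold Spec_largest_contiguous_subarray; infer_instance

-- ===== CLAIM (what is proved, stated in full; the proofs are below) =====
def Claim_equal_largest_contiguous_subarray : Prop := ∀ (arr : List Int), Dom_largest_contiguous_subarray arr → Spec_largest_contiguous_subarray arr (largest_contiguous_subarray arr)

-- ===== LEMMAS AND PROOFS =====

theorem pvFoldlMinSpec (l : List Int) (c : Int) :
    (l.foldl min c = c ∨ l.foldl min c ∈ l) ∧ l.foldl min c ≤ c ∧ ∀ x ∈ l, l.foldl min c ≤ x := by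
  induction l generalizing c with
  | nil => simp
  | cons a t ih =>
    obtain ⟨h1, h2, h3⟩ := ih (min c a)
    refine ⟨?_, ?_, ?_⟩
    · rcases h1 with h | h
      · rcases le_total c a with hca | hca
        · left; rw [List.foldl_cons, h, min_eq_left hca]
        · right; rw [List.foldl_cons, h, min_eq_right hca]; exact List.mem_cons_self
      · right; exact List.mem_cons_of_mem _ h
    · calc (a :: t).foldl min c ≤ min c a := h2
        _ ≤ c := min_le_left _ _
    · intro x hx
      rcases List.mem_cons.1 hx with rfl | hx
      · exact le_trans h2 (min_le_right _ _)
      · exact h3 x hx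
theorem pvFoldlMinEq (l : List Int) (c b : Int) (hb : b = c ∨ b ∈ l) (hbc : b ≤ c)
    (hlb : ∀ x ∈ l, b ≤ x) : l.foldl min c = b := by
  obtain ⟨h1, h2, h3⟩ := pvFoldlMinSpec l c
  have hle : l.foldl min c ≤ b := by
    rcases hb with rfl | h
    · exact h2
    · exact h3 _ h
  have hge : b ≤ l.foldl min c := by
    rcases h1 with h | h
    · rw [h]; exact hbc
    · exact hlb _ h
  omega


theorem pvFoldlMaxSpec (l : List Int) (c : Int) :
    (l.foldl max c = c ∨ l.foldl max c ∈ l) ∧ c ≤ l.foldl max c ∧ ∀ x ∈ l, x ≤ l.foldl max c := by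
  induction l generalizing c with
  | nil => simp
  | cons a t ih =>
    obtain ⟨h1, h2, h3⟩ := ih (max c a)
    refine ⟨?_, ?_, ?_⟩
    · rcases h1 with h | h
      · rcases le_total a c with hca | hca
        · left; rw [List.foldl_cons, h, max_eq_left hca]
        · right; rw [List.foldl_cons, h, max_eq_right hca]; exact List.mem_cons_self
      · right; exact List.mem_cons_of_mem _ h
    · calc c ≤ max c a := le_max_left _ _
        _ ≤ (a :: t).foldl max c := h2
    · intro x hx
      rcases List.mem_cons.1 hx with rfl | hx
      · exact le_trans (le_max_right _ _) h2
      · exact h3 x hx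

theorem pvFoldlMaxEq (l : List Int) (c b : Int) (hb : b = c ∨ b ∈ l) (hbc : c ≤ b)
    (hub : ∀ x ∈ l, x ≤ b) : l.foldl max c = b := by
  obtain ⟨h1, h2, h3⟩ := pvFoldlMaxSpec l c
  have hge : b ≤ l.foldl max c := by
    rcases hb with rfl | h
    · exact h2
    · exact h3 _ h
  have hle : l.foldl max c ≤ b := by
    rcases h1 with h | h
    · rw [h]; exact hbc
    · exact hub _ h
  omega


theorem pvAdjOnes_pairwise_lt (s : List Int) (h : pvAdjOnes s = true) : s.Pairwise (· < ·) := by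
  induction s with
  | nil => simp
  | cons a t ih =>
    cases t with
    | nil => simp
    | cons b t' =>
      rw [pvAdjOnes] at h
      simp only [Bool.and_eq_true, beq_iff_eq] at h
      obtain ⟨h1, h2⟩ := h
      have hp := ih h2
      refine List.pairwise_cons.2 ⟨?_, hp⟩
      intro x hx
      rcases List.mem_cons.1 hx with rfl | hx
      · omega
      · have := (List.pairwise_cons.1 hp).1 x hx
        omega


theorem pvAdjOnes_getLastD (t : List Int) : ∀ a : Int, pvAdjOnes (a :: t) = true →
    (a :: t).getLastD 0 = a + t.length := by
  induction t with
  | nil => simp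
  | cons b t' ih =>
    intro a h
    rw [pvAdjOnes] at h
    simp only [Bool.and_eq_true, beq_iff_eq] at h
    obtain ⟨h1, h2⟩ := h
    have := ih b h2
    simp only [List.getLastD_cons, List.length_cons] at this ⊢
    push_cast at this ⊢
    omega

theorem pvPairwiseLt_getLastD_ge (t : List Int) : ∀ a : Int, (a :: t).Pairwise (· < ·) →
    a + t.length ≤ (a :: t).getLastD 0 := by
  induction t with
  | nil => simp
  | cons b t' ih =>
    intro a h
    have hp := (List.pairwise_cons.1 h).2
    have hab : a < b := (List.pairwise_cons.1 h).1 b List.mem_cons_self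
    have := ih b hp
    simp only [List.getLastD_cons, List.length_cons] at this ⊢
    push_cast at this ⊢
    omega

theorem pvPairwiseLt_adjOnes (t : List Int) : ∀ a : Int, (a :: t).Pairwise (· < ·) →
    (a :: t).getLastD 0 = a + t.length → pvAdjOnes (a :: t) = true := by
  induction t with
  | nil => intro a _ _; rfl
  | cons b t' ih =>
    intro a h hlast
    have hp := (List.pairwise_cons.1 h).2
    have hab : a < b := (List.pairwise_cons.1 h).1 b List.mem_cons_self
    have hge := pvPairwiseLt_getLastD_ge t' b hp
    simp only [List.getLastD_cons, List.length_cons] at hlast hge ⊢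
    push_cast at hlast hge
    have hb : b = a + 1 := by omega
    have htail : pvAdjOnes (b :: t') = true := by
      apply ih b hp
      simp only [List.getLastD_cons]
      omega
    rw [pvAdjOnes]
    simp only [Bool.and_eq_true, beq_iff_eq]
    exact ⟨by omega, htail⟩

theorem pvGetLastD_mem (s : List Int) (h : s ≠ []) : s.getLastD 0 ∈ s := by
  cases s with
  | nil => simp at h
  | cons a t =>
    exact List.mem_of_getLast? rfl

theorem pvPairwiseLe_le_getLastD (s : List Int) (h : s.Pairwise (· ≤ ·)) :
    ∀ x ∈ s, x ≤ s.getLastD 0 := by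
  induction s with
  | nil => simp
  | cons a t ih =>
    intro x hx
    obtain ⟨h1, h2⟩ := List.pairwise_cons.1 h
    cases t with
    | nil => simp only [List.mem_singleton] at hx; subst hx; simp
    | cons b t' =>
      simp only [List.getLastD_cons]
      rcases List.mem_cons.1 hx with rfl | hx
      · have hb := ih h2 b List.mem_cons_self
        simp only [List.getLastD_cons] at hb
        have := h1 b List.mem_cons_self
        omega
      · have := ih h2 x hx
        simp only [List.getLastD_cons] at this
        exact this

theorem pvAdjOnes_nodup (w : List Int)
    (h : pvAdjOnes (PySem.List.sorted w (fun x => x)) = true) : w.Nodup := by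
  have hlt := pvAdjOnes_pairwise_lt _ h
  have hperm : (PySem.List.sorted w (fun x => x)).Perm w := PySem.List.sorted_perm w (fun x => x) false
  exact hperm.nodup_iff.1 hlt.nodup

theorem pvCondIff (w : List Int) (a0 : Int) (hne : w ≠ []) (hnd : w.Nodup) (ha : a0 ∈ w) :
    (pvAdjOnes (PySem.List.sorted w (fun x => x)) = true ↔
      w.foldl max a0 - w.foldl min a0 = (w.length : Int) - 1) := by
  have hperm : (PySem.List.sorted w (fun x => x)).Perm w := PySem.List.sorted_perm w (fun x => x) false
  have hle : (PySem.List.sorted w (fun x => x)).Pairwise (· ≤ ·) := by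
    simpa using PySem.List.sorted_pairwise w (fun x => x)
  have hsne : PySem.List.sorted w (fun x => x) ≠ [] := by
    intro h0
    rw [h0] at hperm
    exact hne hperm.symm.eq_nil
  obtain ⟨m, t, hs⟩ : ∃ m t, PySem.List.sorted w (fun x => x) = m :: t := by
    cases hmt : PySem.List.sorted w (fun x => x) with
    | nil => exact absurd hmt hsne
    | cons m t => exact ⟨m, t, rfl⟩
  rw [hs] at hperm hle ⊢
  have ha' : a0 ∈ m :: t := hperm.mem_iff.2 ha
  have hmle : ∀ x ∈ m :: t, m ≤ x := by
    intro x hx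
    rcases List.mem_cons.1 hx with rfl | hx
    · exact le_refl _
    · exact (List.pairwise_cons.1 hle).1 x hx
  have hub := pvPairwiseLe_le_getLastD _ hle
  have hBmem := pvGetLastD_mem (m :: t) (by simp)
  have hfmin : w.foldl min a0 = m := by
    rw [← hperm.foldl_eq a0]
    exact pvFoldlMinEq _ a0 m (Or.inr List.mem_cons_self) (hmle a0 ha') hmle
  have hfmax : w.foldl max a0 = (m :: t).getLastD 0 := by
    rw [← hperm.foldl_eq a0]
    exact pvFoldlMaxEq _ a0 _ (Or.inr hBmem) (hub a0 ha') hub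
  have hlen : w.length = t.length + 1 := by
    have := hperm.length_eq
    simpa using this.symm
  rw [hfmin, hfmax, hlen]
  constructor
  · intro hadj
    have := pvAdjOnes_getLastD t m hadj
    push_cast
    omega
  · intro heq
    have hnds : (m :: t).Nodup := hperm.nodup_iff.2 hnd
    have hlt : (m :: t).Pairwise (· < ·) := by
      have := List.Pairwise.and hle hnds
      exact this.imp (fun hx => lt_of_le_of_ne hx.1 hx.2)
    apply pvPairwiseLt_adjOnes t m hlt
    push_cast at heq
    omega

theorem pvFoldlNoop (l : List Int) (f : Int → Int → Int) (h : ∀ jj ∈ l, ∀ a, f a jj = a) :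
    ∀ acc, l.foldl f acc = acc := by
  induction l with
  | nil => intro acc; rfl
  | cons b t ih =>
    intro acc
    rw [List.foldl_cons, h b List.mem_cons_self acc]
    exact ih (fun jj hjj => h jj (List.mem_cons_of_mem _ hjj)) acc

theorem pvInnerEq (arr : List Int) (p : Nat) (hp : p < arr.length) :
    ∀ (r k : Nat), p + k + r = arr.length →
    ((arr.drop p).take k).Nodup →
    ∀ ml : Int,
    pvInnerA arr (p : Int) (PySem.List.pyRange ((p : Int) + (k : Int)) (arr.length : Int) 1)
        (PySem.Set.ofList ((arr.drop p).take k))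
        (((arr.drop p).take k).foldl min (PySem.List.pyGetD arr (p : Int) 0))
        (((arr.drop p).take k).foldl max (PySem.List.pyGetD arr (p : Int) 0)) ml
      = (PySem.List.pyRange ((p : Int) + (k : Int)) (arr.length : Int) 1).foldl
          (fun acc j =>
            let w := PySem.List.sorted (PySem.List.slice arr (some (p : Int)) (some (j + 1))) (fun x => x)
            if pvAdjOnes w then max acc (j - (p : Int) + 1) else acc)
          ml := by
  have ha0 : PySem.List.pyGetD arr (p : Int) 0 = arr[p] := by
    rw [PySem.List.pyGetD_natCast, List.getD_eq_getElem arr 0 hp]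
  -- a general fact: the window arr[p:q+1] (as Nat indices) is a take of a drop
  have hslice : ∀ q : Nat, p ≤ q → PySem.List.slice arr (some (p : Int)) (some ((q : Int) + 1))
      = (arr.drop p).take (q + 1 - p) := by
    intro q hq
    have : ((q : Int) + 1) = ((q + 1 : Nat) : Int) := by push_cast; ring
    rw [this, PySem.List.slice_natCast]
  intro r
  induction r with
  | zero =>
    intro k hk hnd ml
    rw [PySem.List.pyRange_one_eq_nil (by omega)]
    simp [pvInnerA]
  | succ r ih =>
    intro k hk hnd ml
    have hpk : p + k < arr.length := by omega
    set w := (arr.drop p).take k with hw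
    set x := arr[p + k] with hxdef
    have hx : PySem.List.pyGetD arr ((p : Int) + (k : Int)) 0 = x := by
      have hcast : ((p : Int) + (k : Int)) = ((p + k : Nat) : Int) := by push_cast; ring
      rw [hcast, PySem.List.pyGetD_natCast, List.getD_eq_getElem arr 0 hpk]
    have hconc : w ++ [x] = (arr.drop p).take (k + 1) := by
      rw [hw, List.take_add_one, List.getElem?_drop, List.getElem?_eq_getElem hpk]
      rfl
    have ha0mem : arr[p] ∈ w ++ [x] := by
      rw [hconc]
      have h0 : 0 < ((arr.drop p).take (k + 1)).length := by
        simp [List.length_take, List.length_drop]; omega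
      have : ((arr.drop p).take (k + 1))[0] = arr[p] := by
        rw [List.getElem_take, List.getElem_drop]
        simp
      rw [← this]
      exact List.getElem_mem h0
    have hlenw1 : (w ++ [x]).length = k + 1 := by
      rw [hconc]
      simp [List.length_take, List.length_drop]; omega
    by_cases hxw : x ∈ w
    · -- A breaks; every remaining window of B contains a duplicate
      have hnoop : ∀ jj ∈ PySem.List.pyRange ((p : Int) + (k : Int)) (arr.length : Int) 1, ∀ acc : Int,
          (fun acc j =>
            let w := PySem.List.sorted (PySem.List.slice arr (some (p : Int)) (some (j + 1))) (fun x => x)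
            if pvAdjOnes w then max acc (j - (p : Int) + 1) else acc) acc jj = acc := by
        intro jj hjj acc
        rw [PySem.List.mem_pyRange_one] at hjj
        have hq : jj = ((jj.toNat : Nat) : Int) := by omega
        have hq1 : p ≤ jj.toNat := by omega
        have hadj : pvAdjOnes (PySem.List.sorted
            (PySem.List.slice arr (some (p : Int)) (some (jj + 1))) (fun x => x)) = false := by
          by_contra hcon
          rw [Bool.not_eq_false] at hcon
          have hnd2 := pvAdjOnes_nodup _ hcon
          rw [hq, hslice jj.toNat hq1] at hnd2
          have hpref : (arr.drop p).take (k + 1) <+: (arr.drop p).take (jj.toNat + 1 - p) :=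
            List.take_prefix_take_left (by omega)
          have := hnd2.sublist hpref.sublist
          rw [← hconc] at this
          simp [List.nodup_append] at this
          exact this.2 x hxw rfl
        simp only [hadj]
        simp
      rw [pvFoldlNoop _ _ hnoop ml]
      rw [PySem.List.pyRange_one_cons (by omega)]
      simp only [pvInnerA, hx]
      have hc : PySem.Set.contains (PySem.Set.ofList w) x = true := by
        rw [PySem.Set.contains_iff]
        exact (PySem.Set.mem_ofList w x).2 hxw
      rw [if_pos hc]
    · -- A does not break: one synchronized step, then the induction hypothesis
      have hnd' : (w ++ [x]).Nodup := by
        rw [List.nodup_append]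
        refine ⟨hnd, List.nodup_singleton _, ?_⟩
        intro a ha b hb
        rw [List.mem_singleton] at hb
        subst hb
        intro he
        exact hxw (he ▸ ha)
      have hcnd : (pvAdjOnes (PySem.List.sorted (w ++ [x]) (fun x => x)) = true ↔
          (w ++ [x]).foldl max arr[p] - (w ++ [x]).foldl min arr[p] = (k : Int)) := by
        have := pvCondIff (w ++ [x]) arr[p] (by simp) hnd' ha0mem
        rw [hlenw1] at this
        push_cast at this
        simpa using this
      rw [PySem.List.pyRange_one_cons (by omega)]
      simp only [pvInnerA, hx, List.foldl_cons]
      rw [if_neg (fun hcc => hxw ((PySem.Set.mem_ofList w x).1 ((PySem.Set.contains_iff _ _).1 hcc)))]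
      -- align the B-side window
      have hwslice : PySem.List.slice arr (some (p : Int)) (some (((p : Int) + (k : Int)) + 1))
          = w ++ [x] := by
        have hcast : ((p : Int) + (k : Int)) = ((p + k : Nat) : Int) := by push_cast; ring
        rw [hcast, hslice (p + k) (by omega), hconc]
        congr 1
        omega
      rw [hwslice]
      -- fold state after this step
      have hminstep : min (w.foldl min (PySem.List.pyGetD arr (p : Int) 0)) x
          = (w ++ [x]).foldl min (PySem.List.pyGetD arr (p : Int) 0) := by
        rw [List.foldl_append]; rfl
      have hmaxstep : max (w.foldl max (PySem.List.pyGetD arr (p : Int) 0)) x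
          = (w ++ [x]).foldl max (PySem.List.pyGetD arr (p : Int) 0) := by
        rw [List.foldl_append]; rfl
      have hji : ((p : Int) + (k : Int)) - (p : Int) = (k : Int) := by ring
      rw [hminstep, hmaxstep, hji, ha0]
      -- the two validity tests agree
      rw [← PySem.Set.ofList_append_singleton]
      by_cases hcnd2 : (w ++ [x]).foldl max arr[p] - (w ++ [x]).foldl min arr[p] = (k : Int)
      · rw [if_pos hcnd2, if_pos (hcnd.2 hcnd2)]
        have := ih (k + 1) (by omega) (by rw [← hconc]; exact hnd') (max ml ((k : Int) + 1))
        rw [← hconc, ha0] at this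
        convert this using 3
      · rw [if_neg hcnd2, if_neg (fun h => hcnd2 (hcnd.1 h))]
        have := ih (k + 1) (by omega) (by rw [← hconc]; exact hnd') ml
        rw [← hconc, ha0] at this
        convert this using 3

-- ===== VERDICT (by name: the statement is the Claim_ definition above) =====
theorem largest_contiguous_subarray_spec : Claim_equal_largest_contiguous_subarray := by
  intro arr _
  unfold Spec_largest_contiguous_subarray largest_contiguous_subarray largest_contiguous_subarray_alt
  refine PySem.List.foldl_congr_mem _ _ _ _ ?_
  intro ml i hi
  rw [PySem.List.mem_pyRange_one] at hi
  have hp : i.toNat < arr.length := by omega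
  have hi' : ((i.toNat : Nat) : Int) = i := by omega
  have := pvInnerEq arr i.toNat hp (arr.length - i.toNat) 0 (by omega) (by simp) ml
  simp only [hi', Nat.cast_zero, Int.add_zero] at this
  simpa using this
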